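-- pv_equiv track=rewrite | github.com/UMBC-CMSC-Hamilton/cmsc201-fall22 | 12-12 Final Review/final_review_4pm.py | force_sort_rec
-- ===== SOURCE A (Python) =====
-- def force_sort_rec(a_list, prev_element=None):
--     if not a_list:
--         return []
--     if prev_element == None:
--         return force_sort_rec(a_list, a_list[0] - 1)
--     elif prev_element <= a_list[0]:
--         return [a_list[0]] + force_sort_rec(a_list[1:], a_list[0])
--     else:
--         return force_sort_rec(a_list[1:], prev_element)
-- ===== SOURCE B (Python) =====
-- def force_sort_rec(a_list, prev_element=None):
--     out = []
--     prev = prev_element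
--     for x in a_list:
--         if prev is None or prev <= x:
--             out.append(x)
--             prev = x
--     return out
-- ===== Notes on version B (the rewrite author's own statement) =====
-- stated objective: faster
-- what changed: Replaced the recursion with list slicing and concatenation by a single iterative pass that tracks the previously kept value and appends to an accumulator list.
import Mathlib
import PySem

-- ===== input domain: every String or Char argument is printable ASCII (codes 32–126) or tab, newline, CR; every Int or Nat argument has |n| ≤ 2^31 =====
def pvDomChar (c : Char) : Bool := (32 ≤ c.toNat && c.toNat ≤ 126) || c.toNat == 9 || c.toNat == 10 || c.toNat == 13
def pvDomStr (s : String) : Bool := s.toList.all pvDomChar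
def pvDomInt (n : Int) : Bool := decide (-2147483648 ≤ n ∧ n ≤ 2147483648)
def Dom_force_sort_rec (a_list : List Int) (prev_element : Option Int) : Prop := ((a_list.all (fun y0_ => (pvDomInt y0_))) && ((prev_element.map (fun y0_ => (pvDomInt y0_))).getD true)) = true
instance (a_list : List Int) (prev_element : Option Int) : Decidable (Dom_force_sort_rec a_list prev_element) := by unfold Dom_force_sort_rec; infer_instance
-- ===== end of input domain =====

-- B replaces A's quadratic recursion (slicing + list concatenation) by one linear pass with an accumulator.

-- ===== PORT A =====
def force_sort_rec (a_list : List Int) (prev_element : Option Int) : List Int :=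
  match a_list, prev_element with
  | [], _ => []
  | x :: xs, none => force_sort_rec (x :: xs) (some (x - 1))
  | x :: xs, some p =>
    if p ≤ x then x :: force_sort_rec xs (some x)
    else force_sort_rec xs (some p)
termination_by (a_list.length, if prev_element.isNone then 1 else 0)

-- ===== PORT B =====
def force_sort_rec_alt (a_list : List Int) (prev_element : Option Int) : List Int :=
  (a_list.foldl (fun (s : List Int × Option Int) x =>
      match s.2 with
      | none => (s.1 ++ [x], some x)
      | some p => if p ≤ x then (s.1 ++ [x], some x) else s)
    ([], prev_element)).1

-- ===== PRECONDITION & SPEC =====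
def Spec_force_sort_rec (a_list : List Int) (prev_element : Option Int) (out : List Int) : Prop := out = force_sort_rec_alt a_list prev_element
instance (a_list : List Int) (prev_element : Option Int) (out : List Int) : Decidable (Spec_force_sort_rec a_list prev_element out) := by unfold Spec_force_sort_rec; infer_instance

-- ===== CLAIM (what is proved, stated in full; the proofs are below) =====
def Claim_equal_force_sort_rec : Prop := ∀ (a_list : List Int) (prev_element : Option Int), Dom_force_sort_rec a_list prev_element → Spec_force_sort_rec a_list prev_element (force_sort_rec a_list prev_element)

-- ===== LEMMAS AND PROOFS =====

-- the loop body of B, named for the lemmas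
def pvStep (s : List Int × Option Int) (x : Int) : List Int × Option Int :=
  match s.2 with
  | none => (s.1 ++ [x], some x)
  | some p => if p ≤ x then (s.1 ++ [x], some x) else s

theorem foldl_pvStep_some (xs : List Int) (p : Int) (acc : List Int) :
    (xs.foldl pvStep (acc, some p)).1 = acc ++ force_sort_rec xs (some p) := by
  induction xs generalizing p acc with
  | nil => simp [force_sort_rec]
  | cons x xs ih =>
    by_cases h : p ≤ x
    · simp [pvStep, force_sort_rec, h, ih]
    · simp [pvStep, force_sort_rec, h, ih]

theorem force_sort_rec_eq_alt (a_list : List Int) (prev_element : Option Int) :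
    force_sort_rec a_list prev_element = force_sort_rec_alt a_list prev_element := by
  cases a_list with
  | nil => cases prev_element <;> simp [force_sort_rec, force_sort_rec_alt]
  | cons x xs =>
    cases prev_element with
    | none =>
      show force_sort_rec (x :: xs) none = _
      rw [force_sort_rec, force_sort_rec]
      simp only [force_sort_rec_alt]
      show _ = (xs.foldl pvStep (pvStep ([], none) x)).1
      simp [pvStep, foldl_pvStep_some]
    | some p =>
      simp only [force_sort_rec_alt]
      show _ = (xs.foldl pvStep (pvStep ([], some p) x)).1
      rw [force_sort_rec]
      by_cases h : p ≤ x <;> simp [pvStep, h, foldl_pvStep_some]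

-- ===== VERDICT (by name: the statement is the Claim_ definition above) =====
theorem force_sort_rec_spec : Claim_equal_force_sort_rec := by
  intro a_list prev_element _
  exact force_sort_rec_eq_alt a_list prev_element
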